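-- pv_equiv track=rewrite | github.com/cheonyeji/algorithm_study | 이코테/이진탐색/q30_가사검색2.py | find_keyword_StartQuesstionmark
-- ===== SOURCE A (Python) =====
-- def first_range(array, target, start, end):
--     # target : 글자 수
--     if start > end:
--         return None
--     mid = (start + end) // 2
--
--     if (mid == 0 or len(array[mid - 1]) != target) and len(array[mid]) == target:
--         return mid
--     elif len(array[mid]) >= target:  # 왼쪽으로
--         return first_range(array, target, start, mid - 1)
--     else:
--         return first_range(array, target, mid + 1, end)
--
-- def last_range(array, target, start, end):
--     if start > end:
--         return None
--     mid = (start + end) // 2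
--
--     if (mid == len(array) - 1 or len(array[mid + 1]) != target) and len(
--         array[mid]
--     ) == target:
--         return mid
--     elif len(array[mid]) > target:  # 왼쪽으로
--         return last_range(array, target, start, mid - 1)
--     else:
--         return last_range(array, target, mid + 1, end)
--
-- def find_keyword_StartQuesstionmark(array, target):
--     # ?가 접두사로 붙는 경우
--     n = len(array)
--     target_notQuestionmark = ""
--     for i in target:
--         if i != "?":
--             target_notQuestionmark += i
--
--     first_idx = first_range(array, len(target), 0, n - 1)
--     if first_idx == None:
--         return 0  # target과 동일한 길이인 글자 0
--
--     last_idx = last_range(array, len(target), 0, n - 1)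
--
--     count = 0
--     for i in range(first_idx, last_idx + 1):
--         if (
--             array[i][len(target) - len(target_notQuestionmark) :]
--             == target_notQuestionmark
--         ):  # 타겟 글자 포함
--             count += 1
--
--     return count
-- ===== SOURCE B (Python) =====
-- def find_keyword_StartQuesstionmark(array, target):
--     n = len(array)
--     L = len(target)
--     pat = "".join(c for c in target if c != "?")
--     # left boundary: first index with len >= L
--     lo, hi = 0, n
--     while lo < hi:
--         mid = (lo + hi) // 2
--         if len(array[mid]) < L:
--             lo = mid + 1
--         else:
--             hi = mid
--     left = lo
--     # right boundary: first index with len > L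
--     lo, hi = left, n
--     while lo < hi:
--         mid = (lo + hi) // 2
--         if len(array[mid]) <= L:
--             lo = mid + 1
--         else:
--             hi = mid
--     right = lo
--     return sum(1 for w in array[left:right] if len(w) == L and w.endswith(pat))
-- ===== Notes on version B (the rewrite author's own statement) =====
-- stated objective: alternative
-- what changed: Replaces A's two early-exit neighbour-checking recursive binary searches by standard iterative lower/upper-bound bisections (lo/hi converging to the block boundaries, no neighbour tests, no early exit), builds the non-'?' pattern with filter/join instead of a character accumulator, and counts via len(w)==L and w.endswith(pat) over the boundary slice instead of an index loop with slice comparison.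
-- outside the precondition, e.g. on find_keyword_StartQuesstionmark(['ab', 'a'], '??'): A returns 1, B returns 0; on find_keyword_StartQuesstionmark(['', '', 'aaa', 'bbb', '', 'cc'], '???'): A raises TypeError, B returns 2
import Mathlib
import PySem

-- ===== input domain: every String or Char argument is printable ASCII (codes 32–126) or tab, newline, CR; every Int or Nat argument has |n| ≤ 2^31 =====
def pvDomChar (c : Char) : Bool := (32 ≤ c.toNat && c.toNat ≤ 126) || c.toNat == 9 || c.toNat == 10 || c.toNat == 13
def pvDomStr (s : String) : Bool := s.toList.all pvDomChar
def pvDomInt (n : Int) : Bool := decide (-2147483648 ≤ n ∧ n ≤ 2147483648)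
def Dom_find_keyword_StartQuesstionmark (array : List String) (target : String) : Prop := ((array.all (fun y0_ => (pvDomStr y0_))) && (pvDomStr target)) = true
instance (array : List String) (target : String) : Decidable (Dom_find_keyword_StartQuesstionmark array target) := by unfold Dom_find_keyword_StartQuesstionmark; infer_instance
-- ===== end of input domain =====

-- B replaces A's early-exit neighbour-checking recursive binary searches by standard iterative
-- lower/upper-bound bisections and counts matching-length words via endswith over the boundary
-- slice (objective: alternative decomposition, same asymptotic cost).


-- ===== PORT A =====
-- len(array[i]); the `none` default 0 is unreachable: every call below keeps i in range
def pvLenAt (array : List String) (i : Int) : Int :=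
  match PySem.List.pyGet? array i with
  | some s => PySem.Str.len s
  | none => 0

def first_range (array : List String) (target start stop : Int) : Option Int :=
  if start > stop then none
  else
    let mid := PySem.Int.floordiv (start + stop) 2
    if (mid = 0 ∨ pvLenAt array (mid - 1) ≠ target) ∧ pvLenAt array mid = target then
      some mid
    else if pvLenAt array mid ≥ target then
      first_range array target start (mid - 1)
    else
      first_range array target (mid + 1) stop
termination_by (stop - start + 1).toNat
decreasing_by
  all_goals
    have hb := PySem.Int.floordiv_two_mid_bounds (by omega : start ≤ stop)
    omega

def last_range (array : List String) (target start stop : Int) : Option Int :=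
  if start > stop then none
  else
    let mid := PySem.Int.floordiv (start + stop) 2
    if (mid = (array.length : Int) - 1 ∨ pvLenAt array (mid + 1) ≠ target) ∧ pvLenAt array mid = target then
      some mid
    else if pvLenAt array mid > target then
      last_range array target start (mid - 1)
    else
      last_range array target (mid + 1) stop
termination_by (stop - start + 1).toNat
decreasing_by
  all_goals
    have hb := PySem.Int.floordiv_two_mid_bounds (by omega : start ≤ stop)
    omega

def find_keyword_StartQuesstionmark (array : List String) (target : String) : Int :=
  let n : Int := array.length
  let tnq : List Char :=
    target.toList.foldl (fun acc c => if c != '?' then acc ++ [c] else acc) []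
  match first_range array (PySem.Str.len target) 0 (n - 1) with
  | none => 0
  | some first_idx =>
    match last_range array (PySem.Str.len target) 0 (n - 1) with
    | none => 0  -- here Python raises TypeError (last_idx is None); outside Pre_
    | some last_idx =>
      (PySem.List.pyRange first_idx (last_idx + 1)).foldl
        (fun count i =>
          if PySem.Chars.slice (PySem.List.pyGetD array i "").toList
               (some (PySem.Str.len target - (tnq.length : Int))) none = tnq
          then count + 1 else count) 0

-- ===== PORT B =====
-- first index in [lo, hi) whose word length is ≥ L (iterative lower-bound bisection)
def pv_bisect_lt (array : List String) (L lo hi : Int) : Int :=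
  if lo < hi then
    let mid := PySem.Int.floordiv (lo + hi) 2
    if pvLenAt array mid < L then pv_bisect_lt array L (mid + 1) hi
    else pv_bisect_lt array L lo mid
  else lo
termination_by (hi - lo).toNat
decreasing_by
  all_goals
    have hb := PySem.Int.floordiv_two_mid_bounds (by omega : lo ≤ hi)
    have hs := (PySem.Int.floordiv_lt_iff_lt_mul (a := lo + hi) (q := hi) (by omega : (0:Int) < 2)).mpr (by omega)
    omega

-- first index in [lo, hi) whose word length is > L (iterative upper-bound bisection)
def pv_bisect_le (array : List String) (L lo hi : Int) : Int :=
  if lo < hi then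
    let mid := PySem.Int.floordiv (lo + hi) 2
    if pvLenAt array mid ≤ L then pv_bisect_le array L (mid + 1) hi
    else pv_bisect_le array L lo mid
  else lo
termination_by (hi - lo).toNat
decreasing_by
  all_goals
    have hb := PySem.Int.floordiv_two_mid_bounds (by omega : lo ≤ hi)
    have hs := (PySem.Int.floordiv_lt_iff_lt_mul (a := lo + hi) (q := hi) (by omega : (0:Int) < 2)).mpr (by omega)
    omega

def find_keyword_StartQuesstionmark_alt (array : List String) (target : String) : Int :=
  let n : Int := array.length
  let L : Int := PySem.Str.len target
  let pat : List Char := target.toList.filter (fun c => c != '?')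
  let left := pv_bisect_lt array L 0 n
  let right := pv_bisect_le array L left n
  (PySem.List.slice array (some left) (some right)).foldl
    (fun count w =>
      if PySem.Str.len w = L ∧ PySem.Chars.endswith w.toList pat = true then count + 1 else count) 0

-- ===== PRECONDITION & SPEC =====
def pvSgn (a b : Nat) : Int := if a < b then -1 else if a = b then 0 else 1

-- Pre_ admits arrays whose word lengths are ordered relative to the target's length (all shorter,
-- then equal, then longer — the invariant A's binary searches assume) and arrays containing no word
-- of the target's length; on other arrays A's searches return accidental counts or raise TypeError.
def Pre_find_keyword_StartQuesstionmark (array : List String) (target : String) : Prop :=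
  (array.map (fun w => pvSgn w.toList.length target.toList.length)).Pairwise (· ≤ ·)
  ∨ ∀ w ∈ array, w.toList.length ≠ target.toList.length
instance (array : List String) (target : String) : Decidable (Pre_find_keyword_StartQuesstionmark array target) := by
  unfold Pre_find_keyword_StartQuesstionmark; infer_instance

def pvWitness_find_keyword_StartQuesstionmark : List String × String := (["a", "bb", "ab", "xyz"], "?b")

def Spec_find_keyword_StartQuesstionmark (array : List String) (target : String) (out : Int) : Prop := out = find_keyword_StartQuesstionmark_alt array target
instance (array : List String) (target : String) (out : Int) : Decidable (Spec_find_keyword_StartQuesstionmark array target out) := by unfold Spec_find_keyword_StartQuesstionmark; infer_instance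

-- ===== CLAIM (what is proved, stated in full; the proofs are below) =====
def Claim_equal_find_keyword_StartQuesstionmark : Prop := ∀ (array : List String) (target : String), Dom_find_keyword_StartQuesstionmark array target → Pre_find_keyword_StartQuesstionmark array target → Spec_find_keyword_StartQuesstionmark array target (find_keyword_StartQuesstionmark array target)

-- ===== LEMMAS AND PROOFS =====

-- in-range indexing reduces to getElem
theorem pvLenAt_eq (array : List String) (i : Int) (h0 : 0 ≤ i) (h1 : i < array.length) :
    pvLenAt array i = ((array[i.toNat]'(by omega)).toList.length : Int) := by
  unfold pvLenAt
  obtain ⟨m, rfl⟩ : ∃ m : Nat, i = (m : Int) := ⟨i.toNat, by omega⟩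
  rw [PySem.List.pyGet?_natCast, List.getElem?_eq_getElem (by exact_mod_cast h1)]
  simp [PySem.Str.len_eq]


-- a downward-closed predicate holds exactly on the first countP positions
theorem pv_countP_char {α : Type} (p : α → Bool) (l : List α)
    (hdc : ∀ i j (hi : i < l.length) (hj : j < l.length), i ≤ j → p l[j] → p l[i]) :
    ∀ i (h : i < l.length), (p l[i] = true ↔ i < l.countP p) := by
  induction l with
  | nil => intro i h; simp at h
  | cons x xs ih =>
    intro i h
    by_cases hx : p x = true
    · have hcount : (x :: xs).countP p = xs.countP p + 1 := by
        simp [hx]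
      cases i with
      | zero => simpa [hcount] using hx
      | succ i =>
        have := ih (fun a b ha hb hab hp => by
          have := hdc (a+1) (b+1) (by simpa using ha) (by simpa using hb) (by omega) (by simpa using hp)
          simpa using this) i (by simpa using h)
        simpa [hcount] using this.trans (by omega)
    · have hall : ∀ j (hj : j < (x :: xs).length), ¬ p (x :: xs)[j] = true := by
        intro j hj hcon
        exact hx (hdc 0 j (by simp) hj (by omega) hcon)
      have hcz : (x :: xs).countP p = 0 := by
        rw [List.countP_eq_zero]
        intro a ha
        obtain ⟨j, hj, rfl⟩ := List.mem_iff_getElem.mp ha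
        exact hall j hj
      rw [hcz]
      simp [hall i h]


-- first_range finds the left boundary of the (nonempty) equal-length block
theorem pv_first_some (array : List String) (L lft rgt : Int)
    (hlt : ∀ i : Int, 0 ≤ i → i < array.length → (pvLenAt array i < L ↔ i < lft))
    (hle : ∀ i : Int, 0 ≤ i → i < array.length → (pvLenAt array i ≤ L ↔ i < rgt))
    (hblk : lft < rgt) (h0 : 0 ≤ lft) :
    ∀ (k : Nat) (start stop : Int), (stop - start + 1).toNat ≤ k →
      0 ≤ start → stop < array.length → start ≤ lft → lft ≤ stop →
      first_range array L start stop = some lft := by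
  intro k
  induction k with
  | zero => intro start stop hk h0s hsn hsl hls; omega
  | succ k ih =>
    intro start stop hk h0s hsn hsl hls
    have hse : ¬ start > stop := by omega
    have hb := PySem.Int.floordiv_two_mid_bounds (by omega : start ≤ stop)
    rw [first_range, if_neg hse]
    simp only []
    set mid := PySem.Int.floordiv (start + stop) 2 with hm
    have hmn : mid < array.length := by omega
    have hm0 : 0 ≤ mid := by omega
    by_cases hcond : (mid = 0 ∨ pvLenAt array (mid - 1) ≠ L) ∧ pvLenAt array mid = L
    · rw [if_pos hcond]
      -- mid = lft
      have h1 : ¬ (pvLenAt array mid < L) := by omega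
      have h2 : lft ≤ mid := by have := hlt mid hm0 hmn; omega
      have h3 : mid < rgt := by have := hle mid hm0 hmn; omega
      by_cases hml : mid = lft
      · rw [hml]
      · exfalso
        have hgt : lft < mid := by omega
        rcases hcond.1 with h | h
        · omega
        · -- len (mid-1) = L since lft ≤ mid-1 < rgt
          have ha : ¬ (pvLenAt array (mid-1) < L) := by have := hlt (mid-1) (by omega) (by omega); omega
          have hbb : pvLenAt array (mid-1) ≤ L := by have := hle (mid-1) (by omega) (by omega); omega
          omega
    · rw [if_neg hcond]
      by_cases hge : pvLenAt array mid ≥ L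
      · rw [if_pos hge]
        have h2 : lft ≤ mid := by have := hlt mid hm0 hmn; omega
        have hne : lft ≠ mid := by
          intro he
          apply hcond
          constructor
          · by_cases hz : mid = 0
            · exact Or.inl hz
            · refine Or.inr ?_
              have := hlt (mid-1) (by omega) (by omega)
              omega
          · have := hle mid hm0 hmn
            omega
        exact ih start (mid - 1) (by omega) h0s (by omega) hsl (by omega)
      · rw [if_neg hge]
        have : mid < lft := by have := hlt mid hm0 hmn; omega
        exact ih (mid + 1) stop (by omega) (by omega) hsn (by omega) hls


-- when no word has length L, first_range finds nothing
theorem pv_first_none (array : List String) (L : Int)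
    (hno : ∀ i : Int, 0 ≤ i → i < array.length → pvLenAt array i ≠ L) :
    ∀ (k : Nat) (start stop : Int), (stop - start + 1).toNat ≤ k →
      0 ≤ start → stop < array.length →
      first_range array L start stop = none := by
  intro k
  induction k with
  | zero =>
    intro start stop hk h0s hsn
    have hse : start > stop := by omega
    rw [first_range, if_pos hse]
  | succ k ih =>
    intro start stop hk h0s hsn
    by_cases hse : start > stop
    · rw [first_range, if_pos hse]
    · have hb := PySem.Int.floordiv_two_mid_bounds (by omega : start ≤ stop)
      rw [first_range, if_neg hse]
      simp only []
      set mid := PySem.Int.floordiv (start + stop) 2 with hm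
      have hL := hno mid (by omega) (by omega)
      rw [if_neg (by tauto)]
      by_cases hge : pvLenAt array mid ≥ L
      · rw [if_pos hge]; exact ih start (mid - 1) (by omega) h0s (by omega)
      · rw [if_neg hge]; exact ih (mid + 1) stop (by omega) (by omega) hsn


-- last_range finds the right boundary of the (nonempty) equal-length block
theorem pv_last_some (array : List String) (L lft rgt : Int)
    (hlt : ∀ i : Int, 0 ≤ i → i < array.length → (pvLenAt array i < L ↔ i < lft))
    (hle : ∀ i : Int, 0 ≤ i → i < array.length → (pvLenAt array i ≤ L ↔ i < rgt))
    (hblk : lft < rgt) (hrn : rgt ≤ array.length) (_h0 : 0 ≤ lft) :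
    ∀ (k : Nat) (start stop : Int), (stop - start + 1).toNat ≤ k →
      0 ≤ start → stop < array.length → start ≤ rgt - 1 → rgt - 1 ≤ stop →
      last_range array L start stop = some (rgt - 1) := by
  intro k
  induction k with
  | zero => intro start stop hk h0s hsn hsl hls; omega
  | succ k ih =>
    intro start stop hk h0s hsn hsl hls
    have hse : ¬ start > stop := by omega
    have hb := PySem.Int.floordiv_two_mid_bounds (by omega : start ≤ stop)
    rw [last_range, if_neg hse]
    simp only []
    set mid := PySem.Int.floordiv (start + stop) 2 with hm
    have hmn : mid < array.length := by omega
    have hm0 : 0 ≤ mid := by omega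
    by_cases hcond : (mid = (array.length : Int) - 1 ∨ pvLenAt array (mid + 1) ≠ L) ∧ pvLenAt array mid = L
    · rw [if_pos hcond]
      have h2 : lft ≤ mid := by have := hlt mid hm0 hmn; omega
      have h3 : mid < rgt := by have := hle mid hm0 hmn; omega
      by_cases hml : mid = rgt - 1
      · rw [hml]
      · exfalso
        have hltr : mid < rgt - 1 := by omega
        rcases hcond.1 with h | h
        · omega
        · have ha : ¬ (pvLenAt array (mid+1) < L) := by have := hlt (mid+1) (by omega) (by omega); omega
          have hbb : pvLenAt array (mid+1) ≤ L := by have := hle (mid+1) (by omega) (by omega); omega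
          omega
    · rw [if_neg hcond]
      by_cases hgt : pvLenAt array mid > L
      · rw [if_pos hgt]
        have : rgt ≤ mid := by have := hle mid hm0 hmn; omega
        exact ih start (mid - 1) (by omega) h0s (by omega) hsl (by omega)
      · rw [if_neg hgt]
        have hmr : mid ≤ rgt - 1 := by have := hle mid hm0 hmn; omega
        have hne : mid ≠ rgt - 1 := by
          intro he
          apply hcond
          have hmL : pvLenAt array mid = L := by
            have h2 := hlt mid hm0 hmn
            have h3 := hle mid hm0 hmn
            omega
          refine ⟨?_, hmL⟩
          by_cases hz : mid = (array.length : Int) - 1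
          · exact Or.inl hz
          · refine Or.inr ?_
            have := hle (mid+1) (by omega) (by omega)
            omega
        exact ih (mid + 1) stop (by omega) (by omega) hsn (by omega) hls


-- the lower-bound bisection converges to lft
theorem pv_bisect_lt_eq (array : List String) (L lft : Int)
    (hlt : ∀ i : Int, 0 ≤ i → i < array.length → (pvLenAt array i < L ↔ i < lft)) :
    ∀ (k : Nat) (lo hi : Int), (hi - lo).toNat ≤ k →
      0 ≤ lo → hi ≤ array.length → lo ≤ lft → lft ≤ hi →
      pv_bisect_lt array L lo hi = lft := by
  intro k
  induction k with
  | zero =>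
    intro lo hi hk _h0 hn hl hr
    rw [pv_bisect_lt, if_neg (by omega)]
    omega
  | succ k ih =>
    intro lo hi hk h0 hn hl hr
    by_cases hlh : lo < hi
    · have hb := PySem.Int.floordiv_two_mid_bounds (by omega : lo ≤ hi)
      have hs := (PySem.Int.floordiv_lt_iff_lt_mul (a := lo + hi) (q := hi) (by omega : (0:Int) < 2)).mpr (by omega)
      rw [pv_bisect_lt, if_pos hlh]
      simp only []
      set mid := PySem.Int.floordiv (lo + hi) 2 with hm
      have hc := hlt mid (by omega) (by omega)
      by_cases hmlt : pvLenAt array mid < L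
      · rw [if_pos hmlt]
        exact ih (mid + 1) hi (by omega) (by omega) hn (by omega) hr
      · rw [if_neg hmlt]
        exact ih lo mid (by omega) h0 (by omega) hl (by omega)
    · rw [pv_bisect_lt, if_neg hlh]
      omega


-- the upper-bound bisection converges to rgt
theorem pv_bisect_le_eq (array : List String) (L rgt : Int)
    (hle : ∀ i : Int, 0 ≤ i → i < array.length → (pvLenAt array i ≤ L ↔ i < rgt)) :
    ∀ (k : Nat) (lo hi : Int), (hi - lo).toNat ≤ k →
      0 ≤ lo → hi ≤ array.length → lo ≤ rgt → rgt ≤ hi →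
      pv_bisect_le array L lo hi = rgt := by
  intro k
  induction k with
  | zero =>
    intro lo hi hk h0 hn hl hr
    rw [pv_bisect_le, if_neg (by omega)]
    omega
  | succ k ih =>
    intro lo hi hk h0 hn hl hr
    by_cases hlh : lo < hi
    · have hb := PySem.Int.floordiv_two_mid_bounds (by omega : lo ≤ hi)
      have hs := (PySem.Int.floordiv_lt_iff_lt_mul (a := lo + hi) (q := hi) (by omega : (0:Int) < 2)).mpr (by omega)
      rw [pv_bisect_le, if_pos hlh]
      simp only []
      set mid := PySem.Int.floordiv (lo + hi) 2 with hm
      have hc := hle mid (by omega) (by omega)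
      by_cases hmle : pvLenAt array mid ≤ L
      · rw [if_pos hmle]
        exact ih (mid + 1) hi (by omega) (by omega) hn (by omega) hr
      · rw [if_neg hmle]
        exact ih lo mid (by omega) h0 (by omega) hl (by omega)
    · rw [pv_bisect_le, if_neg hlh]
      omega


-- for a word of length exactly L, "suffix slice equals pat" is "endswith pat"
theorem pv_cond_iff (l : List Char) (pat : List Char) (L : Nat) (hlen : l.length = L)
    (hp : pat.length ≤ L) :
    (l.drop (L - pat.length) = pat ↔ pat <:+ l) := by
  constructor
  · intro h
    have ht := List.take_append_drop (L - pat.length) l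
    rw [h] at ht
    exact ⟨l.take (L - pat.length), ht⟩
  · rintro ⟨t, rfl⟩
    have ht : t.length = L - pat.length := by simp at hlen; omega
    rw [← ht, List.drop_left]


-- a contiguous slice viewed through indices
theorem pv_take_drop_map {α : Type} (d : α) (l : List α) (m j : Nat) (h : j + m ≤ l.length) :
    (l.drop j).take m = (List.range m).map (fun k => l.getD (j+k) d) := by
  apply List.ext_getElem
  · simp; omega
  · intro i h1 h2
    simp only [List.getElem_take, List.getElem_drop, List.getElem_map, List.getElem_range]
    rw [List.getD_eq_getElem _ _ (by simp at h1; omega)]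

-- ===== VERDICT (by name: the statement is the Claim_ definition above) =====
theorem find_keyword_StartQuesstionmark_spec : Claim_equal_find_keyword_StartQuesstionmark := by
  intro array target _hDom hPre
  unfold Spec_find_keyword_StartQuesstionmark
  set L : Nat := target.toList.length with hL
  set pat : List Char := target.toList.filter (fun c => c != '?') with hpat
  have hpatle : pat.length ≤ L := by rw [hpat, hL]; exact List.length_filter_le _ _
  have hStrLen : PySem.Str.len target = (L : Int) := by rw [PySem.Str.len_eq, hL]
  have htnq : target.toList.foldl (fun acc c => if c != '?' then acc ++ [c] else acc) ([] : List Char) = pat := by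
    simpa using PySem.List.foldl_append_if (fun c => c != '?') id target.toList []
  show find_keyword_StartQuesstionmark array target = find_keyword_StartQuesstionmark_alt array target
  rw [find_keyword_StartQuesstionmark, find_keyword_StartQuesstionmark_alt]
  simp only [← hpat, htnq, hStrLen]
  by_cases hno : ∀ w ∈ array, w.toList.length ≠ L
  · -- no word of the target's length: both sides are 0
    have hnoI : ∀ i : Int, 0 ≤ i → i < (array.length : Int) → pvLenAt array i ≠ (L : Int) := by
      intro i h0 h1 he
      rw [pvLenAt_eq array i h0 (by omega)] at he
      exact hno _ (List.getElem_mem _) (by exact_mod_cast he)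
    have hfr : first_range array (L : Int) 0 ((array.length : Int) - 1) = none :=
      pv_first_none array (L : Int) hnoI array.length 0 ((array.length : Int) - 1)
        (by omega) (by omega) (by omega)
    rw [hfr]
    rw [PySem.List.foldl_ite_add_one]
    have hz : (PySem.List.slice array (some (pv_bisect_lt array (↑L) 0 ↑array.length))
        (some (pv_bisect_le array (↑L) (pv_bisect_lt array (↑L) 0 ↑array.length) ↑array.length))).countP
        (fun w => decide (PySem.Str.len w = (L : Int) ∧ PySem.Chars.endswith w.toList pat = true)) = 0 := by
      rw [List.countP_eq_zero]
      intro w hw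
      simp only [decide_eq_true_eq, not_and]
      intro hlenw _
      rw [PySem.Str.len_eq] at hlenw
      exact absurd (by exact_mod_cast hlenw) (hno w (PySem.List.mem_of_mem_slice _ _ _ hw))
    rw [hz]
    simp
  · -- the equal-length block is nonempty; the signs are monotone
    have hm : (array.map (fun w => pvSgn w.toList.length L)).Pairwise (· ≤ ·) := by
      rcases hPre with h | h
      · exact h
      · exact absurd h hno
    push_neg at hno
    obtain ⟨w0, hw0, hw0L⟩ := hno
    set lftN : Nat := array.countP (fun w => decide (w.toList.length < L)) with hlftN
    set rgtN : Nat := array.countP (fun w => decide (w.toList.length ≤ L)) with hrgtN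
    have hpw := List.pairwise_iff_getElem.mp hm
    have hsgn : ∀ i j (hi : i < array.length) (hj : j < array.length), i < j →
        pvSgn (array[i]'(by omega)).toList.length L ≤ pvSgn (array[j]'(by omega)).toList.length L := by
      intro i j hi hj hij
      have := hpw i j (by simpa using hi) (by simpa using hj) hij
      simpa using this
    have hcharlt : ∀ i (h : i < array.length), ((array[i]'(by omega)).toList.length < L ↔ i < lftN) := by
      intro i h
      have := pv_countP_char (fun w => decide (w.toList.length < L)) array
        (fun a b ha hb hab hp => by
          rcases Nat.eq_or_lt_of_le hab with rfl | hlt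
          · exact hp
          · have := hsgn a b (by omega) (by omega) hlt
            simp only [decide_eq_true_eq] at hp ⊢
            unfold pvSgn at this
            split_ifs at this <;> omega) i (by omega)
      simpa [← hlftN] using this
    have hcharle : ∀ i (h : i < array.length), ((array[i]'(by omega)).toList.length ≤ L ↔ i < rgtN) := by
      intro i h
      have := pv_countP_char (fun w => decide (w.toList.length ≤ L)) array
        (fun a b ha hb hab hp => by
          rcases Nat.eq_or_lt_of_le hab with rfl | hlt
          · exact hp
          · have := hsgn a b (by omega) (by omega) hlt
            simp only [decide_eq_true_eq] at hp ⊢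
            unfold pvSgn at this
            split_ifs at this <;> omega) i (by omega)
      simpa [← hrgtN] using this
    have hltI : ∀ i : Int, 0 ≤ i → i < (array.length : Int) → (pvLenAt array i < (L : Int) ↔ i < (lftN : Int)) := by
      intro i h0 h1
      rw [pvLenAt_eq array i h0 h1]
      have := hcharlt i.toNat (by omega)
      omega
    have hleI : ∀ i : Int, 0 ≤ i → i < (array.length : Int) → (pvLenAt array i ≤ (L : Int) ↔ i < (rgtN : Int)) := by
      intro i h0 h1
      rw [pvLenAt_eq array i h0 h1]
      have := hcharle i.toNat (by omega)
      omega
    have hrnN : rgtN ≤ array.length := by rw [hrgtN]; exact List.countP_le_length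
    have hblk : lftN < rgtN := by
      obtain ⟨j, hj, rfl⟩ := List.mem_iff_getElem.mp hw0
      have h1 := hcharlt j (by omega)
      have h2 := hcharle j (by omega)
      omega
    have hfr : first_range array (L : Int) 0 ((array.length : Int) - 1) = some (lftN : Int) :=
      pv_first_some array (L : Int) (lftN : Int) (rgtN : Int)
        hltI hleI
        (by omega) (by omega)
        array.length 0 ((array.length : Int) - 1) (by omega) (by omega) (by omega) (by omega) (by omega)
    have hlr : last_range array (L : Int) 0 ((array.length : Int) - 1) = some ((rgtN : Int) - 1) :=
      pv_last_some array (L : Int) (lftN : Int) (rgtN : Int)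
        hltI hleI
        (by omega) (by omega) (by omega)
        array.length 0 ((array.length : Int) - 1) (by omega) (by omega) (by omega) (by omega) (by omega)
    have hleft : pv_bisect_lt array (L : Int) 0 (array.length : Int) = (lftN : Int) :=
      pv_bisect_lt_eq array (L : Int) (lftN : Int) hltI
        array.length 0 (array.length : Int) (by omega) (by omega) (by omega) (by omega) (by omega)
    have hright : pv_bisect_le array (L : Int) (lftN : Int) (array.length : Int) = (rgtN : Int) :=
      pv_bisect_le_eq array (L : Int) (rgtN : Int) hleI
        array.length (lftN : Int) (array.length : Int) (by omega) (by omega) (by omega) (by omega) (by omega)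
    rw [hfr, hlr, hleft, hright]
    dsimp only
    have hr1 : ((rgtN : Int) - 1) + 1 = (rgtN : Int) := by omega
    rw [hr1]
    -- both folds count the same block
    rw [PySem.List.pyRange_one, List.foldl_map, PySem.List.slice_toNat (a := (lftN : Int)) (b := (rgtN : Int)) array (by omega) (by omega)]
    rw [PySem.List.foldl_ite_add_one
      (fun k : Nat => PySem.Chars.slice (PySem.List.pyGetD array ((lftN : Int) + (k : Int)) "").toList
        (some ((L : Int) - (pat.length : Int))) none = pat)]
    rw [PySem.List.foldl_ite_add_one
      (fun w : String => PySem.Str.len w = (L : Int) ∧ PySem.Chars.endswith w.toList pat = true)]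
    simp only [Int.toNat_natCast]
    rw [pv_take_drop_map "" array (rgtN - lftN) lftN (by omega)]
    rw [List.countP_map]
    rw [show (((rgtN : Int)) - ((lftN : Int))).toNat = rgtN - lftN from by omega]
    simp only [zero_add, Nat.cast_inj]
    apply List.countP_congr
    intro k hk
    rw [List.mem_range] at hk
    have hidx : lftN + k < array.length := by omega
    have hwd : array.getD (lftN + k) "" = array[lftN + k]'(by omega) :=
      List.getD_eq_getElem _ _ (by omega)
    have hwlen : (array[lftN + k]'(by omega)).toList.length = L := by
      have h1 := hcharlt (lftN + k) hidx
      have h2 := hcharle (lftN + k) hidx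
      omega
    have hci : ((lftN : Int) + (k : Int)) = ((lftN + k : Nat) : Int) := by omega
    simp only [Function.comp, decide_eq_true_eq, hci, PySem.List.pyGetD_natCast, hwd, PySem.Chars.slice_eq_listSlice]
    rw [PySem.List.slice_from ((array[lftN + k]'(by omega)).toList) (by omega : (0:Int) ≤ (L : Int) - (pat.length : Int))]
    have htn : ((L : Int) - (pat.length : Int)).toNat = L - pat.length := by omega
    rw [htn]
    rw [pv_cond_iff _ pat L hwlen hpatle]
    simp [PySem.Str.len_eq, hwlen, PySem.Chars.endswith_iff]
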